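-- pv_equiv track=rewrite | github.com/iubizi/mixed | 0066 加一.py | func
-- ===== SOURCE A (Python) =====
-- def func(digits):
--     digits = [0] + digits # 添加首位
--     digits[-1] += 1 # 整个数+1
--
--     for i in range(len(digits)-1, 0, -1): # 从最后一位到第二位
--         if digits[i] == 10:
--             digits[i] = 0 # 10没了
--             digits[i-1] += 1 # 进位
--         else: # 行波加法器结束
--             break
--
--     if digits[0] == 0:  return digits[1:]
--     else:               return digits
-- ===== SOURCE B (Python) =====
-- def func(digits):
--     n = len(digits)
--     k = 0
--     while k < n and digits[n - 1 - k] == 9: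
--         k += 1
--     if k == n:
--         return [1] + [0] * n
--     return digits[:n - k - 1] + [digits[n - k - 1] + 1] + [0] * k
-- ===== Notes on version B (the rewrite author's own statement) =====
-- stated objective: alternative
-- what changed: B counts the trailing run of 9s and assembles the answer by slicing (prefix + incremented pivot + zero block, or [1]+[0]*n on full overflow), instead of A's sentinel-prepended in-place carry-propagation loop; correct because A's ==10 carry fires exactly on digits that were 9.
import Mathlib
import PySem

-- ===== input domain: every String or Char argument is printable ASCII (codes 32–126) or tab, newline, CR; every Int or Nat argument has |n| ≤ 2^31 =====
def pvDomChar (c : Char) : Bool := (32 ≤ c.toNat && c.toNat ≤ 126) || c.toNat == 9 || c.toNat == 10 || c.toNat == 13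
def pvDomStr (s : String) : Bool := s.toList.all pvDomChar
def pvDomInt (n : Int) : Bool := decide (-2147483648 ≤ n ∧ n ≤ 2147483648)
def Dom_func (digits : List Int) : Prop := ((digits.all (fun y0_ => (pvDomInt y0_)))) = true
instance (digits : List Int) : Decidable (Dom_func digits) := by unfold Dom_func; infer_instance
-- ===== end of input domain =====

-- B counts the trailing-9 run and assembles the answer by slicing instead of A's
-- sentinel-and-carry loop; same O(n) cost, no speed claim. Neither mutates its argument.

-- ===== PORT A =====
-- A's break-loop: i runs len-1, len-2, …, 1 over the sentinel-extended list; i = 0 means the loop is over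
def funcLoop : Nat → List Int → List Int
  | 0, ys => ys
  | j+1, ys =>
    if ys.getD (j+1) 0 = 10 then
      funcLoop j ((ys.set (j+1) 0).set j ((ys.set (j+1) 0).getD j 0 + 1))
    else ys

def func (digits : List Int) : List Int :=
  let ys0 := 0 :: digits                                   -- digits = [0] + digits
  let n := ys0.length
  let ys1 := ys0.set (n-1) (ys0.getD (n-1) 0 + 1)          -- digits[-1] += 1 (list nonempty)
  let ys := funcLoop (n-1) ys1                             -- for i in range(len-1, 0, -1) with break
  if ys.getD 0 0 = 0 then ys.drop 1 else ys

-- ===== PORT B =====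
-- B's while-loop counting the trailing run of 9s, as recursion over the reversed list
def trail9 : List Int → Nat
  | [] => 0
  | d :: rest => if d = 9 then trail9 rest + 1 else 0

def func_alt (digits : List Int) : List Int :=
  let n := digits.length
  let k := trail9 digits.reverse
  if k = n then 1 :: List.replicate n 0
  else digits.take (n - k - 1) ++ [digits.getD (n - k - 1) 0 + 1] ++ List.replicate k 0

-- ===== PRECONDITION & SPEC =====
def Spec_func (digits : List Int) (out : List Int) : Prop := out = func_alt digits
instance (digits : List Int) (out : List Int) : Decidable (Spec_func digits out) := by unfold Spec_func; infer_instance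

-- ===== CLAIM =====
def Claim_equal_func : Prop := ∀ (digits : List Int), Dom_func digits → Spec_func digits (func digits)

-- ===== LEMMAS AND PROOFS =====

theorem funcLoop_length (i : Nat) (ys : List Int) : (funcLoop i ys).length = ys.length := by
  induction i generalizing ys with
  | zero => simp [funcLoop]
  | succ j ih => simp only [funcLoop]; split_ifs <;> simp [ih]

-- the loop never touches indices beyond i, so a tail past position i rides along
theorem funcLoop_append (i : Nat) (ys t : List Int) (h : i < ys.length) :
    funcLoop i (ys ++ t) = funcLoop i ys ++ t := by
  induction i generalizing ys with
  | zero => simp [funcLoop]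
  | succ j ih =>
    have hg : (ys ++ t).getD (j+1) 0 = ys.getD (j+1) 0 := List.getD_append _ _ _ _ h
    simp only [funcLoop, hg]
    split_ifs with hc
    · rw [List.set_append_left _ _ h]
      have hj : j < (ys.set (j+1) 0).length := by simp; omega
      rw [List.getD_append _ _ _ _ hj, List.set_append_left _ _ hj]
      exact ih _ (by simp; omega)
    · rfl

theorem getD_last (l : List Int) (d : Int) : (l ++ [d]).getD l.length 0 = d := by
  rw [List.getD_append_right _ _ _ _ le_rfl]; simp

theorem set_last (l : List Int) (d x : Int) : (l ++ [d]).set l.length x = l ++ [x] := by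
  induction l with
  | nil => rfl
  | cons a l ih => simp [ih]

theorem trail9_le (l : List Int) : trail9 l ≤ l.length := by
  induction l with
  | nil => simp [trail9]
  | cons d rest ih => simp only [trail9]; split_ifs <;> simp; omega

-- B on xs ++ [d] when the last digit is a 9: result is B on xs with a 0 appended
theorem alt_carry (xs : List Int) (d : Int) (h : d = 9) :
    func_alt (xs ++ [d]) = func_alt xs ++ [0] := by
  unfold func_alt
  have hk : trail9 (xs ++ [d]).reverse = trail9 xs.reverse + 1 := by
    simp [List.reverse_append, trail9, h]
  rw [hk]
  set k := trail9 xs.reverse with hkdef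
  have hkle : k ≤ xs.length := by
    have := trail9_le xs.reverse; simpa using this
  simp only [List.length_append, List.length_singleton]
  by_cases hfull : k = xs.length
  · rw [if_pos (by omega), if_pos hfull]
    simp [List.replicate_succ' (n := xs.length)]
  · rw [if_neg (by omega), if_neg hfull]
    have h1 : xs.length + 1 - (k + 1) - 1 = xs.length - k - 1 := by omega
    have h2 : xs.length - k - 1 < xs.length := by omega
    rw [h1, List.take_append_of_le_length (by omega),
        List.getD_append _ _ _ _ h2,
        List.replicate_succ' (n := k)]
    simp

-- B on xs ++ [d] when the last digit is not a 9
theorem alt_stop (xs : List Int) (d : Int) (h : ¬ d = 9) :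
    func_alt (xs ++ [d]) = xs ++ [d + 1] := by
  unfold func_alt
  have hk : trail9 (xs ++ [d]).reverse = 0 := by
    simp [List.reverse_append, trail9, h]
  rw [hk]
  simp only [List.length_append, List.length_singleton]
  rw [if_neg (by omega)]
  have h1 : xs.length + 1 - 0 - 1 = xs.length := by omega
  rw [h1, List.take_append_of_le_length le_rfl, getD_last]
  simp

theorem func_eq_alt (digits : List Int) : func digits = func_alt digits := by
  induction digits using List.reverseRecOn with
  | nil => decide
  | append_singleton xs d ih =>
    have hlen : (0 :: (xs ++ [d])).length - 1 = (0 :: xs).length := by simp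
    have hget : (0 :: (xs ++ [d])).getD ((0 :: (xs ++ [d])).length - 1) 0 = d := by
      rw [hlen]; exact getD_last (0 :: xs) d
    have hset : ∀ x : Int, (0 :: (xs ++ [d])).set ((0 :: (xs ++ [d])).length - 1) x
        = (0 :: xs) ++ [x] := by
      intro x; rw [hlen]; exact set_last (0 :: xs) d x
    show (let ys := funcLoop ((0 :: (xs ++ [d])).length - 1)
            ((0 :: (xs ++ [d])).set ((0 :: (xs ++ [d])).length - 1)
              ((0 :: (xs ++ [d])).getD ((0 :: (xs ++ [d])).length - 1) 0 + 1));
          if ys.getD 0 0 = 0 then ys.drop 1 else ys) = func_alt (xs ++ [d])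
    rw [hget, hset, hlen]
    by_cases h9 : d = 9
    · -- carry continues: peel one loop step on both sides and use ih
      have h10 : d + 1 = 10 := by omega
      have hstep : funcLoop (0 :: xs).length ((0 :: xs) ++ [d + 1])
          = funcLoop ((0 :: xs).length - 1)
              ((0 :: xs).set ((0 :: xs).length - 1)
                ((0 :: xs).getD ((0 :: xs).length - 1) 0 + 1)) ++ [0] := by
        have hl : (0 :: xs).length = ((0 :: xs).length - 1) + 1 := by simp
        rw [hl]
        simp only [funcLoop]
        rw [← hl, getD_last (0 :: xs) (d+1), if_pos h10, set_last (0 :: xs) (d+1) 0]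
        have hj : (0 :: xs).length - 1 < (0 :: xs).length := by simp
        rw [List.getD_append _ _ _ _ hj, List.set_append_left _ _ hj]
        exact funcLoop_append _ _ _ (by simp)
      rw [hstep]
      set R := funcLoop ((0 :: xs).length - 1)
          ((0 :: xs).set ((0 :: xs).length - 1)
            ((0 :: xs).getD ((0 :: xs).length - 1) 0 + 1)) with hR
      have hRlen : R.length = xs.length + 1 := by rw [hR, funcLoop_length]; simp
      have hRne : R ≠ [] := by intro h; rw [h] at hRlen; simp at hRlen
      obtain ⟨r0, rs, hRcons⟩ := List.exists_cons_of_ne_nil hRne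
      have hA : func xs = if R.getD 0 0 = 0 then R.drop 1 else R := rfl
      rw [alt_carry xs d h9, ← ih, hA, hRcons]
      by_cases hz : r0 = 0 <;> simp [hz]
    · -- carry stops immediately at the last digit
      have h10 : ¬ d + 1 = 10 := by omega
      have hl : (0 :: xs).length = ((0 :: xs).length - 1) + 1 := by simp
      rw [hl]
      simp only [funcLoop]
      rw [← hl, getD_last (0 :: xs) (d+1), if_neg h10, alt_stop xs d h9]
      simp

-- ===== VERDICT =====
theorem func_spec : Claim_equal_func := by
  intro digits _
  exact func_eq_alt digits
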